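-- pv_equiv track=rewrite | github.com/starlightknown/Cyberon | utils/converters.py | display
-- ===== SOURCE A (Python) =====
-- def display(seconds, granularity=5):
--     """
--     Displays the number of seconds in weeks, days, hours, minutes, and seconds.
--     Examples:
--         5440 seconds -> "1 hour 30 minutes 40 seconds"
--         7201 seconds -> "2 hours 1 second"
--     """
--     conversions = (
--         ('weeks', 604800),  # 1 week = 604800 seconds
--         ('days', 86400),    # 1 day  = 86400 seconds
--         ('hours', 3600),    # 1 hour = 3600 seconds
--         ('minutes', 60),
--         ('seconds', 1)
--     )
--
--     result = []
--     for interval, value in conversions: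
--         num = seconds // value
--         if num:
--             seconds -=  num * value
--             if num == 1:
--                 interval = interval.rstrip('s')
--             result.append(f'{num} {interval}')
--
--     return ' '.join(result[:granularity])
-- ===== SOURCE B (Python) =====
-- def display(seconds, granularity=5):
--     """
--     Displays the number of seconds in weeks, days, hours, minutes, and seconds.
--     Bottom-up divmod chain: peels units smallest-first with the ratio to the
--     next unit (60, 60, 24, 7), collecting parts in reverse and flipping at the end.
--     """
--     parts = []
--     q = seconds
--     for ratio, name in ((60, 'second'), (60, 'minute'), (24, 'hour'), (7, 'day')):
--         q, r = divmod(q, ratio)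
--         if r:
--             parts.append(f"{r} {name}{'s' if r != 1 else ''}")
--     if q:
--         parts.append(f"{q} week{'s' if q != 1 else ''}")
--     parts.reverse()
--     return ' '.join(parts[:granularity])
-- ===== Notes on version B (the rewrite author's own statement) =====
-- stated objective: alternative
-- what changed: B peels units bottom-up with a divmod chain by the unit ratios (60, 60, 24, 7) — the absolute divisors 604800/86400/3600 never appear — collecting parts smallest-first into a list that is reversed at the end, instead of A's top-down subtract-and-carry over absolute divisors; singulars are built by conditionally appending 's' instead of rstrip'ing a plural.
import Mathlib
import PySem

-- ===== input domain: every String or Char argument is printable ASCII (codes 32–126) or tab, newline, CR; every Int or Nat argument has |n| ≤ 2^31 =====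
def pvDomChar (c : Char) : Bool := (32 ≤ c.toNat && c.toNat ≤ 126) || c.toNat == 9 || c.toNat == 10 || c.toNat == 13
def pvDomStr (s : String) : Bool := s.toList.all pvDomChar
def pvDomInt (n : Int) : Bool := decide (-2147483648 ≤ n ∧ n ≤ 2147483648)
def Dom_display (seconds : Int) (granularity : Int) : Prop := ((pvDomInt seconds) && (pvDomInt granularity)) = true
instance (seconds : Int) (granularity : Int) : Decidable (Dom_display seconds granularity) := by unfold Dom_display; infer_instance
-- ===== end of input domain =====

-- B peels units bottom-up with a divmod chain by unit ratios (60,60,24,7), collecting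
-- parts smallest-first and reversing, instead of A's top-down subtract-and-carry over
-- absolute divisors (alternative decomposition, same cost).


-- ===== PORT A =====
-- interval.rstrip('s'): drop trailing 's' characters (exact for rstrip with a char set {'s'})
def rstripS (s : String) : String := String.ofList ((s.toList.reverse.dropWhile (fun c => c = 's')).reverse)

def display (seconds : Int) (granularity : Int) : String :=
  let conversions : List (String × Int) :=
    [("weeks", 604800), ("days", 86400), ("hours", 3600), ("minutes", 60), ("seconds", 1)]
  let final := conversions.foldl
    (fun (st : Int × List String) iv =>
      let num := PySem.Int.floordiv st.1 iv.2
      if num ≠ 0 then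
        (st.1 - num * iv.2,
         st.2 ++ [PySem.Int.toStr num ++ " " ++ (if num = 1 then rstripS iv.1 else iv.1)])
      else st)
    (seconds, [])
  PySem.Str.join " " (PySem.List.slice final.2 none (some granularity))

-- ===== PORT B =====
def display_alt (seconds : Int) (granularity : Int) : String :=
  let st := ([(60, "second"), (60, "minute"), (24, "hour"), (7, "day")] : List (Int × String)).foldl
    (fun (st : Int × List String) rv =>
      -- q, r = divmod(q, ratio); ratio > 0 so divmod is total: floordiv/mod
      let q := PySem.Int.floordiv st.1 rv.1
      let r := PySem.Int.mod st.1 rv.1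
      if r ≠ 0 then
        (q, st.2 ++ [PySem.Int.toStr r ++ " " ++ rv.2 ++ (if r ≠ 1 then "s" else "")])
      else (q, st.2))
    (seconds, [])
  let parts := if st.1 ≠ 0 then
      st.2 ++ [PySem.Int.toStr st.1 ++ " week" ++ (if st.1 ≠ 1 then "s" else "")]
    else st.2
  PySem.Str.join " " (PySem.List.slice parts.reverse none (some granularity))

-- ===== PRECONDITION & SPEC =====
def Spec_display (seconds : Int) (granularity : Int) (out : String) : Prop := out = display_alt seconds granularity
instance (seconds : Int) (granularity : Int) (out : String) : Decidable (Spec_display seconds granularity out) := by unfold Spec_display; infer_instance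

-- ===== CLAIM (what is proved, stated in full; the proofs are below) =====
def Claim_equal_display : Prop := ∀ (seconds : Int) (granularity : Int), Dom_display seconds granularity → Spec_display seconds granularity (display seconds granularity)

-- ===== LEMMAS AND PROOFS =====

-- (a % (b*c)) / b = (a / b) % c for a positive inner divisor b: the carried remainder's
-- next quotient is the independent modular component.
theorem modDivKey (a b c : Int) (hb : 0 < b) : (a % (b*c)) / b = (a / b) % c := by
  rw [Int.emod_def, Int.emod_def, ← Int.ediv_ediv_of_nonneg (le_of_lt hb)]
  have h : a - b * c * (a / b / c) = a + (-(c * (a / b / c))) * b := by ring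
  rw [h, Int.add_mul_ediv_right _ _ (ne_of_gt hb)]
  ring

-- fold two adjacent string appends into one literal
theorem fuseStr (a b c : String) (h : a ++ b = c) (x : String) : a ++ (b ++ x) = c ++ x := by
  rw [← String.append_assoc, h]

-- one step of A's fold
theorem stepAEq (s : Int) (acc : List String) (name : String) (v : Int) :
    (fun (st : Int × List String) (iv : String × Int) =>
      let num := PySem.Int.floordiv st.1 iv.2
      if num ≠ 0 then
        (st.1 - num * iv.2,
         st.2 ++ [PySem.Int.toStr num ++ " " ++ (if num = 1 then rstripS iv.1 else iv.1)])
      else st) (s, acc) (name, v)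
    = (PySem.Int.mod s v,
       acc ++ (if PySem.Int.floordiv s v ≠ 0 then
         [PySem.Int.toStr (PySem.Int.floordiv s v) ++ " " ++
           (if PySem.Int.floordiv s v = 1 then rstripS name else name)] else [])) := by
  have hm : PySem.Int.mod s v = s - PySem.Int.floordiv s v * v := by
    have := PySem.Int.floordiv_mul_add_mod s v
    omega
  by_cases h : PySem.Int.floordiv s v = 0 <;> simp [h, hm]

-- one step of B's fold
theorem stepBEq (s : Int) (acc : List String) (v : Int) (name : String) :
    (fun (st : Int × List String) (rv : Int × String) =>
      let q := PySem.Int.floordiv st.1 rv.1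
      let r := PySem.Int.mod st.1 rv.1
      if r ≠ 0 then
        (q, st.2 ++ [PySem.Int.toStr r ++ " " ++ rv.2 ++ (if r ≠ 1 then "s" else "")])
      else (q, st.2)) (s, acc) (v, name)
    = (PySem.Int.floordiv s v,
       acc ++ (if PySem.Int.mod s v ≠ 0 then
         [PySem.Int.toStr (PySem.Int.mod s v) ++ " " ++ name ++
           (if PySem.Int.mod s v ≠ 1 then "s" else "")] else [])) := by
  by_cases h : PySem.Int.mod s v = 0 <;> simp [h]

theorem display_eq (s g : Int) : display s g = display_alt s g := by
  unfold display display_alt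
  simp only [List.foldl_cons, List.foldl_nil,
    stepAEq _ _ _ 604800, stepAEq _ _ _ 86400, stepAEq _ _ _ 3600,
    stepAEq _ _ _ 60, stepAEq _ _ _ 1,
    stepBEq _ _ 60 "second", stepBEq _ _ 60 "minute",
    stepBEq _ _ 24 "hour", stepBEq _ _ 7 "day"]
  have fd : ∀ a b : Int, 0 < b → PySem.Int.floordiv a b = a / b :=
    fun a b hb => PySem.Int.floordiv_eq_ediv_of_pos hb
  have md : ∀ a b : Int, 0 < b → PySem.Int.mod a b = a % b :=
    fun a b hb => PySem.Int.mod_eq_emod_of_pos hb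
  simp only [fd _ _ (by norm_num : (0:Int) < 604800), fd _ _ (by norm_num : (0:Int) < 86400),
    fd _ _ (by norm_num : (0:Int) < 3600), fd _ _ (by norm_num : (0:Int) < 60),
    fd _ _ (by norm_num : (0:Int) < 24), fd _ _ (by norm_num : (0:Int) < 7),
    fd _ _ (by norm_num : (0:Int) < 1),
    md _ _ (by norm_num : (0:Int) < 604800), md _ _ (by norm_num : (0:Int) < 86400),
    md _ _ (by norm_num : (0:Int) < 3600), md _ _ (by norm_num : (0:Int) < 60),
    md _ _ (by norm_num : (0:Int) < 24), md _ _ (by norm_num : (0:Int) < 7)]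
  rw [show ∀ x : Int, x / 1 = x from fun x => Int.ediv_one x]
  -- A's carried remainders → independent components
  have h1 : s % 604800 / 86400 = s / 86400 % 7 := by
    rw [show (604800 : Int) = 86400 * 7 by norm_num]; exact modDivKey s 86400 7 (by norm_num)
  have h1' : s % 604800 % 86400 = s % 86400 := Int.emod_emod_of_dvd s (by norm_num)
  have h2 : s % 86400 / 3600 = s / 3600 % 24 := by
    rw [show (86400 : Int) = 3600 * 24 by norm_num]; exact modDivKey s 3600 24 (by norm_num)
  have h2' : s % 86400 % 3600 = s % 3600 := Int.emod_emod_of_dvd s (by norm_num)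
  have h3 : s % 3600 / 60 = s / 60 % 60 := by
    rw [show (3600 : Int) = 60 * 60 by norm_num]; exact modDivKey s 60 60 (by norm_num)
  have h3' : s % 3600 % 60 = s % 60 := Int.emod_emod_of_dvd s (by norm_num)
  rw [h1', h2', h3', h1, h2, h3]
  -- B's quotient chain → independent components
  have g1 : s / 60 / 60 = s / 3600 := by
    rw [Int.ediv_ediv_of_nonneg (by norm_num : (0:Int) ≤ 60)]; norm_num
  have g2 : s / 3600 / 24 = s / 86400 := by
    rw [Int.ediv_ediv_of_nonneg (by norm_num : (0:Int) ≤ 3600)]; norm_num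
  have g3 : s / 86400 / 7 = s / 604800 := by
    rw [Int.ediv_ediv_of_nonneg (by norm_num : (0:Int) ≤ 86400)]; norm_num
  rw [g1, g2, g3]
  -- align singular/plural strings
  have words : ∀ (n : Int) (sing plur : String), rstripS plur = sing → sing ++ "s" = plur →
      (if n = 1 then rstripS plur else plur) = sing ++ (if n ≠ 1 then "s" else "") := by
    intro n sing plur hstrip happ
    by_cases h : n = 1 <;> simp [h, hstrip, happ]
  rw [words _ "week" "weeks" (by decide) rfl, words _ "day" "days" (by decide) rfl,
      words _ "hour" "hours" (by decide) rfl, words _ "minute" "minutes" (by decide) rfl,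
      words _ "second" "seconds" (by decide) rfl]
  by_cases c1 : s / 604800 = 0 <;> by_cases c2 : s / 86400 % 7 = 0 <;>
    by_cases c3 : s / 3600 % 24 = 0 <;> by_cases c4 : s / 60 % 60 = 0 <;>
    by_cases c5 : s % 60 = 0 <;>
    simp [c1, c2, c3, c4, c5, String.append_assoc,
      fuseStr " " "week" " week" rfl, fuseStr " " "day" " day" rfl,
      fuseStr " " "hour" " hour" rfl, fuseStr " " "minute" " minute" rfl,
      fuseStr " " "second" " second" rfl]

-- ===== VERDICT (by name: the statement is the Claim_ definition above) =====
theorem display_spec : Claim_equal_display := by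
  intro s g _
  unfold Spec_display
  exact display_eq s g
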